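-- pv_equiv track=rewrite | github.com/timhuijsmans1/search_engine | search/retrieval/retrieval_execution/retrieval_execution.py | delta_decoder
-- ===== SOURCE A (Python) =====
-- def delta_decoder(delta_encoded_inverted_list):
--     """
--     input params:
--     v_byte_encoded_inverted_list : dictionary
--         one key being the word, and values a list with delta encoded doc_id and decoded positions
--
--     return:
--     inverted list in its original format {word: [document_count, {doc_number: [positions]}}
--     """
--     doc_count, delta_pos_combos = delta_encoded_inverted_list  # int, list
--     list_out = [doc_count, {}]
--
--     # add the first doc number manually
--     current_doc_num, positions = delta_pos_combos[0]  # int, list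
--     list_out[1][current_doc_num] = positions  # add doc and pos to doc_pos dict
--
--     for delta_pos_combo in delta_pos_combos[1:]:
--         delta, positions = delta_pos_combo
--         current_doc_num = current_doc_num + delta
--         list_out[1][current_doc_num] = positions
--
--     return list_out
-- ===== SOURCE B (Python) =====
-- def delta_decoder(delta_encoded_inverted_list):
--     doc_count, delta_pos_combos = delta_encoded_inverted_list
--     # absolute doc number i is just the sum of the first i+1 deltas:
--     # recompute each one from scratch as a prefix-slice sum (no running accumulator)
--     deltas = [delta for delta, _ in delta_pos_combos]
--     inverted = {sum(deltas[:i + 1]): positions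
--                 for i, (_, positions) in enumerate(delta_pos_combos)}
--     return [doc_count, inverted]
-- ===== Notes on version B (the rewrite author's own statement) =====
-- stated objective: alternative
-- what changed: Drops A's running-sum accumulator entirely: each absolute doc number is recomputed independently as the sum of a prefix slice of the delta list, and the dict is built by one comprehension over enumerate; trades A's O(n) single pass for an accumulator-free O(n^2) formulation.
import Mathlib
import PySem

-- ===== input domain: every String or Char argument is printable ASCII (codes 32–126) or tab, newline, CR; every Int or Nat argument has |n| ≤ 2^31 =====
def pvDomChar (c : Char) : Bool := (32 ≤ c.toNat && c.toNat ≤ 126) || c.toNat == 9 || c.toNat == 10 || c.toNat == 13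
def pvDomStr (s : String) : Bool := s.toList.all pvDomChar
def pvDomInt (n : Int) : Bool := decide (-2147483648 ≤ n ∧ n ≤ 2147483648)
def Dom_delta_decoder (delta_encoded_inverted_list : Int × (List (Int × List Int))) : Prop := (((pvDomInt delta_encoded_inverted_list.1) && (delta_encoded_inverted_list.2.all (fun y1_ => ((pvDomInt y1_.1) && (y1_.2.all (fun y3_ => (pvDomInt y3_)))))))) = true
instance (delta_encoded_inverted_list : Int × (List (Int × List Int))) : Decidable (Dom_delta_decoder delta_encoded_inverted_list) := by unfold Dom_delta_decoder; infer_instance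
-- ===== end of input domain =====

-- B removes A's running-sum accumulator: each doc number is an independent prefix-slice sum, dict built by one comprehension (an alternative, not faster).


-- ===== PORT A =====
def delta_decoder (delta_encoded_inverted_list : Int × (List (Int × List Int))) : Int × (List (Int × List Int)) :=
  let doc_count := delta_encoded_inverted_list.1
  match delta_encoded_inverted_list.2 with
  | [] => (doc_count, [])  -- unreachable under Pre_: delta_pos_combos[0] raises IndexError
  | (current_doc_num, positions) :: rest =>
    let st := rest.foldl
      (fun (st : Int × PySem.Dict Int (List Int)) combo =>
        (st.1 + combo.1, st.2.insert (st.1 + combo.1) combo.2))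
      (current_doc_num, (PySem.Dict.empty : PySem.Dict Int (List Int)).insert current_doc_num positions)
    (doc_count, st.2.items)

-- ===== PORT B =====
def delta_decoder_alt (delta_encoded_inverted_list : Int × (List (Int × List Int))) : Int × (List (Int × List Int)) :=
  let doc_count := delta_encoded_inverted_list.1
  let combos := delta_encoded_inverted_list.2
  -- deltas = [delta for delta, _ in combos]
  let deltas := combos.map (fun dp => dp.1)
  -- {sum(deltas[:i + 1]): positions for i, (_, positions) in enumerate(combos)}
  let inverted := (PySem.List.enumerate combos 0).foldl
    (fun (d : PySem.Dict Int (List Int)) ip =>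
      d.insert (PySem.List.slice deltas none (some (ip.1 + 1))).sum ip.2.2)
    PySem.Dict.empty
  (doc_count, inverted.items)

-- ===== PRECONDITION & SPEC =====
-- Pre_ excludes only the empty combo list, on which A raises IndexError.
def Pre_delta_decoder (delta_encoded_inverted_list : Int × (List (Int × List Int))) : Prop :=
  delta_encoded_inverted_list.2 ≠ []
instance (delta_encoded_inverted_list : Int × (List (Int × List Int))) : Decidable (Pre_delta_decoder delta_encoded_inverted_list) := by unfold Pre_delta_decoder; infer_instance
def pvWitness_delta_decoder : (Int × (List (Int × List Int))) := (2, [(3, [1, 2]), (2, [5])])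
def Spec_delta_decoder (delta_encoded_inverted_list : Int × (List (Int × List Int))) (out : Int × (List (Int × List Int))) : Prop := out = delta_decoder_alt delta_encoded_inverted_list
instance (delta_encoded_inverted_list : Int × (List (Int × List Int))) (out : Int × (List (Int × List Int))) : Decidable (Spec_delta_decoder delta_encoded_inverted_list out) := by unfold Spec_delta_decoder; infer_instance

-- ===== CLAIM (what is proved, stated in full; the proofs are below) =====
def Claim_equal_delta_decoder : Prop := ∀ (delta_encoded_inverted_list : Int × (List (Int × List Int))), Dom_delta_decoder delta_encoded_inverted_list → Pre_delta_decoder delta_encoded_inverted_list → Spec_delta_decoder delta_encoded_inverted_list (delta_decoder delta_encoded_inverted_list)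

-- ===== LEMMAS AND PROOFS =====

/-- The (key, value) pairs A's loop inserts, starting from running doc number `n`. -/
def pairsFrom (n : Int) : List (Int × List Int) → List (Int × List Int)
  | [] => []
  | c :: t => (n + c.1, c.2) :: pairsFrom (n + c.1) t

theorem a_fold_eq_pairs (l : List (Int × List Int)) :
    ∀ (n : Int) (d : PySem.Dict Int (List Int)),
      (l.foldl (fun (st : Int × PySem.Dict Int (List Int)) combo =>
          (st.1 + combo.1, st.2.insert (st.1 + combo.1) combo.2)) (n, d)).2
        = (pairsFrom n l).foldl (fun d p => d.insert p.1 p.2) d := by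
  induction l with
  | nil => intro n d; rfl
  | cons c t ih => intro n d; simp only [List.foldl_cons, pairsFrom]; exact ih (n + c.1) (d.insert (n + c.1) c.2)

theorem b_fold_inv (l : List (Int × List Int)) :
    ∀ (pre : List Int) (d : PySem.Dict Int (List Int)),
      (PySem.List.enumerate l (pre.length : Int)).foldl
          (fun (d : PySem.Dict Int (List Int)) ip =>
            d.insert (PySem.List.slice (pre ++ l.map (fun dp => dp.1)) none (some (ip.1 + 1))).sum ip.2.2) d
        = (pairsFrom pre.sum l).foldl (fun d p => d.insert p.1 p.2) d := by
  induction l with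
  | nil => intro pre d; simp [PySem.List.enumerate_nil, pairsFrom]
  | cons c t ih =>
    intro pre d
    rw [PySem.List.enumerate_cons, List.foldl_cons]
    have h1 : ((pre.length : Int) + 1) = ((pre.length + 1 : Nat) : Int) := by push_cast; ring
    have hslice : PySem.List.slice (pre ++ (c :: t).map (fun dp => dp.1)) none (some ((pre.length : Int) + 1))
        = pre ++ [c.1] := by
      rw [h1, PySem.List.slice_to_natCast]
      simp [List.take_append]
    rw [hslice]
    have h3 : pre ++ (c :: t).map (fun dp => dp.1) = (pre ++ [c.1]) ++ t.map (fun dp => dp.1) := by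
      simp
    have h2 : ((pre.length : Int) + 1) = (((pre ++ [c.1]).length : Nat) : Int) := by
      simp
    rw [h3, h2, ih (pre ++ [c.1]) (d.insert (pre ++ [c.1]).sum c.2)]
    simp [pairsFrom]

-- ===== VERDICT (by name: the statement is the Claim_ definition above) =====
theorem delta_decoder_spec : Claim_equal_delta_decoder := by
  intro x _ hpre
  obtain ⟨dc, combos⟩ := x
  cases combos with
  | nil => exact absurd rfl hpre
  | cons c rest =>
    obtain ⟨n0, p0⟩ := c
    show delta_decoder (dc, (n0, p0) :: rest) = delta_decoder_alt (dc, (n0, p0) :: rest)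
    simp only [delta_decoder, delta_decoder_alt]
    rw [a_fold_eq_pairs]
    rw [PySem.List.enumerate_cons, List.foldl_cons]
    have hs : PySem.List.slice (((n0, p0) :: rest).map (fun dp => dp.1)) none (some ((0 : Int) + 1))
        = [n0] := by
      have h1 : ((0 : Int) + 1) = ((1 : Nat) : Int) := by norm_num
      rw [h1, PySem.List.slice_to_natCast]; simp
    rw [hs]
    have hmap : ((n0, p0) :: rest).map (fun dp => dp.1) = [n0] ++ rest.map (fun dp => dp.1) := by simp
    have hstart : ((0 : Int) + 1) = (((([n0] : List Int)).length : Nat) : Int) := by simp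
    rw [hmap, hstart, b_fold_inv rest [n0]]
    simp
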